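-- pv_equiv track=rewrite | github.com/h8h/convertSpardaKontoauszugToCSV | lib/spardaKontoauszug.py | __getPayeeMemo__
-- ===== SOURCE A (Python) =====
-- def __getPayeeMemo__(text):
--     # Die Methode versucht den Text in Zahlungsempfaenger und in Buchungstext
--     # aufzuteilen
--     payee, memo, cnt = [], [], 0
--     for part in text.split(' '):
--         if cnt <= 2:
--             if part == "":
--                 cnt += 1
--             else:
--                 payee.append(part)
--         else:
--             if part != "":
--                 memo.append(part)
--
--     return " ".join(payee), " ".join(memo)
-- ===== SOURCE B (Python) =====
-- def __getPayeeMemo__(text):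
--     parts = text.split(' ')
--     cut = len(parts)
--     empties = 0
--     for i, p in enumerate(parts):
--         if p == "":
--             empties += 1
--             if empties == 3:
--                 cut = i + 1
--                 break
--     payee = " ".join(p for p in parts[:cut] if p)
--     memo = " ".join(p for p in parts[cut:] if p)
--     return payee, memo
-- ===== Notes on version B (the rewrite author's own statement) =====
-- stated objective: alternative
-- what changed: Replaced A's single state-machine fold (payee/memo/counter state) by first finding the cut index right after the 3rd empty token, then building payee and memo as two filtered joins over the slices before and after the cut.
import Mathlib
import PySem

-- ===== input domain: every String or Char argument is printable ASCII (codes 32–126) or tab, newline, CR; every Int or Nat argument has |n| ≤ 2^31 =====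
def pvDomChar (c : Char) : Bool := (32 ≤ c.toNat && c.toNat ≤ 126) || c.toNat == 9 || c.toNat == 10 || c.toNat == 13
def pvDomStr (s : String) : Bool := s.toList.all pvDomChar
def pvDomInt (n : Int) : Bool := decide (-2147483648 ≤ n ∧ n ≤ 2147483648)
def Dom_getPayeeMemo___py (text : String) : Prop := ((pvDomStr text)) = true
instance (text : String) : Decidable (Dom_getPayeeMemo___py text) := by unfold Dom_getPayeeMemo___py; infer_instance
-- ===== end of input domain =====

-- B replaces A's single state-machine fold by a cut-index search followed by two filtered joins (objective: alternative decomposition).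


-- ===== PORT A =====
-- A's loop body: state (payee, memo, cnt)
def pvStepA (s : List String × List String × Nat) (part : String) : List String × List String × Nat :=
  if s.2.2 ≤ 2 then
    if part = "" then (s.1, s.2.1, s.2.2 + 1) else (s.1 ++ [part], s.2.1, s.2.2)
  else
    if part ≠ "" then (s.1, s.2.1 ++ [part], s.2.2) else (s.1, s.2.1, s.2.2)

def getPayeeMemo___py (text : String) : String × String :=
  let r := ((PySem.Str.split? text " ").getD []).foldl pvStepA ([], [], 0)
  (PySem.Str.join " " r.1, PySem.Str.join " " r.2.1)

-- ===== PORT B =====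
-- Source B's cut search: index right after the 3rd empty token, else the list length
def pvCutFind : List String → Nat → Nat
  | [], _ => 0
  | p :: rest, e =>
    if p = "" then
      if e + 1 = 3 then 1 else 1 + pvCutFind rest (e + 1)
    else 1 + pvCutFind rest e

def getPayeeMemo___py_alt (text : String) : String × String :=
  let parts := (PySem.Str.split? text " ").getD []
  let cut := pvCutFind parts 0
  (PySem.Str.join " " ((parts.take cut).filter (fun p => p ≠ "")),
   PySem.Str.join " " ((parts.drop cut).filter (fun p => p ≠ "")))

-- ===== PRECONDITION & SPEC =====
def Spec_getPayeeMemo___py (text : String) (out : String × String) : Prop := out = getPayeeMemo___py_alt text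
instance (text : String) (out : String × String) : Decidable (Spec_getPayeeMemo___py text out) := by unfold Spec_getPayeeMemo___py; infer_instance

-- ===== CLAIM (what is proved, stated in full; the proofs are below) =====
def Claim_equal_getPayeeMemo___py : Prop := ∀ (text : String), Dom_getPayeeMemo___py text → Spec_getPayeeMemo___py text (getPayeeMemo___py text)

-- ===== LEMMAS AND PROOFS =====

-- once cnt is past 2, every nonempty token goes to memo
theorem pvStepA_saturated (l : List String) (p m : List String) (c : Nat) (hc : ¬ c ≤ 2) :
    List.foldl pvStepA (p, m, c) l = (p, m ++ l.filter (fun s => s ≠ ""), c) := by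
  induction l generalizing m with
  | nil => simp
  | cons hd tl ih =>
    simp only [List.foldl_cons, pvStepA, hc, if_false]
    by_cases h : hd = "" <;> simp [h, ih]

theorem pvStepA_main (l : List String) (p m : List String) (c : Nat) (hc : c ≤ 2) :
    (List.foldl pvStepA (p, m, c) l).1
      = p ++ (l.take (pvCutFind l c)).filter (fun s => s ≠ "") ∧
    (List.foldl pvStepA (p, m, c) l).2.1
      = m ++ (l.drop (pvCutFind l c)).filter (fun s => s ≠ "") := by
  induction l generalizing p m c with
  | nil => simp [pvCutFind]
  | cons hd tl ih =>
    by_cases h : hd = ""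
    · subst h
      have hstep : pvStepA (p, m, c) "" = (p, m, c + 1) := by
        simp [pvStepA, hc]
      rw [List.foldl_cons, hstep]
      by_cases h3 : c + 1 = 3
      · have hnot : ¬ c + 1 ≤ 2 := by omega
        rw [pvStepA_saturated tl p m (c+1) hnot]
        simp [pvCutFind, h3]
      · have hle : c + 1 ≤ 2 := by omega
        obtain ⟨h1, h2⟩ := ih p m (c+1) hle
        have hcomm : 1 + pvCutFind tl (c+1) = pvCutFind tl (c+1) + 1 := Nat.add_comm _ _
        simp [pvCutFind, h3, h1, h2, hcomm, List.take_succ_cons, List.drop_succ_cons]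
    · have hstep : pvStepA (p, m, c) hd = (p ++ [hd], m, c) := by
        simp [pvStepA, hc, h]
      rw [List.foldl_cons, hstep]
      obtain ⟨h1, h2⟩ := ih (p ++ [hd]) m c hc
      have hcomm : 1 + pvCutFind tl c = pvCutFind tl c + 1 := Nat.add_comm _ _
      simp [pvCutFind, h, h1, h2, hcomm, List.take_succ_cons, List.drop_succ_cons]

-- ===== VERDICT (by name: the statement is the Claim_ definition above) =====
theorem getPayeeMemo___py_spec : Claim_equal_getPayeeMemo___py := by
  intro text _
  unfold Spec_getPayeeMemo___py getPayeeMemo___py getPayeeMemo___py_alt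
  obtain ⟨h1, h2⟩ := pvStepA_main ((PySem.Str.split? text " ").getD []) [] [] 0 (by omega)
  simp [h1, h2]
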